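-- pv_equiv track=rewrite | github.com/Erebuzzz/merge-ytm | backend/tests/test_properties.py | simulate_rate_limit
-- ===== SOURCE A (Python) =====
-- def simulate_rate_limit(request_count: int, limit: int) -> list[int]:
--     """Simulate rate limiting: returns HTTP status codes for each request."""
--     statuses = []
--     counter = 0
--     for _ in range(request_count):
--         counter += 1
--         if counter > limit:
--             statuses.append(429)
--         else:
--             statuses.append(200)
--     return statuses
-- ===== SOURCE B (Python) =====
-- def simulate_rate_limit(request_count: int, limit: int) -> list[int]:
--     """Simulate rate limiting: returns HTTP status codes for each request."""
--     ones = max(0, min(request_count, limit))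
--     total = max(0, request_count)
--     return [200] * ones + [429] * (total - ones)
-- ===== Notes on version B (the rewrite author's own statement) =====
-- stated objective: simpler
-- what changed: Replaces the per-request counter loop with a closed-form count: the number of 200s is max(0, min(request_count, limit)) and the rest are 429s, built as two bulk list segments.
import Mathlib
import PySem

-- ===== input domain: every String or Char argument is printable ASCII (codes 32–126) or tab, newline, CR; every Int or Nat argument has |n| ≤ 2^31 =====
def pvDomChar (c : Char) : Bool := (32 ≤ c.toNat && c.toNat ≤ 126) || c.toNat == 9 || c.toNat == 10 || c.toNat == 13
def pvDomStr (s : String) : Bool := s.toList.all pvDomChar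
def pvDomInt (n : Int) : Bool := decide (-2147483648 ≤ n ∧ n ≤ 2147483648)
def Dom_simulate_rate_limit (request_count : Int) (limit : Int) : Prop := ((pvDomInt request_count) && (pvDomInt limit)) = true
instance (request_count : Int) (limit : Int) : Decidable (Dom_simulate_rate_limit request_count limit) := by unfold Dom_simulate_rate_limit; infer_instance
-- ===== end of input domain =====

-- B replaces A's per-request counter loop with a closed-form count of 200s and two bulk segments (objective: simpler).

-- ===== PORT A =====
-- literal port of A's loop: statuses, counter accumulated over range(request_count)
def simulate_rate_limit (request_count : Int) (limit : Int) : List Int :=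
  ((PySem.List.pyRange 0 request_count 1).foldl
    (fun (st : List Int × Int) _ =>
      let counter := st.2 + 1
      if counter > limit then (st.1 ++ [429], counter) else (st.1 ++ [200], counter))
    ([], 0)).1

-- ===== PORT B =====
def simulate_rate_limit_alt (request_count : Int) (limit : Int) : List Int :=
  let ones := (max 0 (min request_count limit)).toNat
  let total := (max 0 request_count).toNat
  List.replicate ones 200 ++ List.replicate (total - ones) 429

-- ===== PRECONDITION & SPEC =====
def Spec_simulate_rate_limit (request_count : Int) (limit : Int) (out : List Int) : Prop := out = simulate_rate_limit_alt request_count limit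
instance (request_count : Int) (limit : Int) (out : List Int) : Decidable (Spec_simulate_rate_limit request_count limit out) := by unfold Spec_simulate_rate_limit; infer_instance

-- ===== CLAIM (what is proved, stated in full; the proofs are below) =====
def Claim_equal_simulate_rate_limit : Prop := ∀ (request_count : Int) (limit : Int), Dom_simulate_rate_limit request_count limit → Spec_simulate_rate_limit request_count limit (simulate_rate_limit request_count limit)

-- ===== LEMMAS AND PROOFS =====

-- A's loop, from any accumulator and counter, produces min/subtraction-counted segments of 200s and 429s.
theorem simulate_rate_limit_loop (limit : Int) :
    ∀ (l : List Int) (acc : List Int) (c : Int),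
      (l.foldl
        (fun (st : List Int × Int) _ =>
          let counter := st.2 + 1
          if counter > limit then (st.1 ++ [429], counter) else (st.1 ++ [200], counter))
        (acc, c)).1
      = acc ++ List.replicate (min l.length (limit - c).toNat) 200
            ++ List.replicate (l.length - min l.length (limit - c).toNat) 429 := by
  intro l
  induction l with
  | nil => intro acc c; simp
  | cons x xs ih =>
    intro acc c
    by_cases h : c + 1 > limit
    · have h0 : (limit - c).toNat = 0 := by omega
      have h1 : (limit - (c + 1)).toNat = 0 := by omega
      simp only [List.foldl_cons, if_pos h, ih (acc ++ [429]) (c + 1), h0, h1]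
      simp [List.replicate_succ, List.append_assoc]
    · have h2 : min (xs.length + 1) (limit - c).toNat
          = min xs.length (limit - (c + 1)).toNat + 1 := by omega
      have h3 : xs.length + 1 - min (xs.length + 1) (limit - c).toNat
          = xs.length - min xs.length (limit - (c + 1)).toNat := by omega
      simp only [List.foldl_cons, if_neg h, ih (acc ++ [200]) (c + 1)]
      simp only [List.length_cons, h2]
      simp [List.replicate_succ, List.append_assoc]

-- ===== VERDICT (by name: the statement is the Claim_ definition above) =====
theorem simulate_rate_limit_spec : Claim_equal_simulate_rate_limit := by
  intro rc limit _
  unfold Spec_simulate_rate_limit simulate_rate_limit simulate_rate_limit_alt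
  rw [simulate_rate_limit_loop]
  have hlen : (PySem.List.pyRange 0 rc 1).length = (rc - 0).toNat :=
    PySem.List.length_pyRange_one 0 rc
  rw [hlen]
  have h1 : min (rc - 0).toNat (limit - 0).toNat = (max 0 (min rc limit)).toNat := by omega
  have h2 : (rc - 0).toNat = (max 0 rc).toNat := by omega
  rw [h1, h2]
  simp
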